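-- pv_equiv track=rewrite | github.com/psipred/Antibody-design | scripts/training_data_curation/Sabdab/loop_span.py | choose_chain_by_sequence_match
-- ===== SOURCE A (Python) =====
-- def choose_chain_by_sequence_match(chains_dict, target_seq: str):
--     """
--     Pick the chain whose sequence best matches target_seq.
--     We first try exact match, else substring containment, else best overlap by length of LCS-ish proxy.
--     For your data, exact/containment should usually work.
--
--     This function is used to identify which PDB chain corresponds to VH and which
--     to VL, using the FASTA sequences (which were already extracted and trimmed)
--     as the reference.
--     """
--     # exact
--     for c, d in chains_dict.items():
--         if d["seq"] == target_seq:
--             return c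
--
--     # containment (sometimes PDB has extra residues; usually not, but safe)
--     for c, d in chains_dict.items():
--         if target_seq in d["seq"] or d["seq"] in target_seq:
--             return c
--
--     # fallback: best character overlap in order (very rough, but avoids total failure)
--     def rough_score(a, b):
--         # count matching characters at same positions for min length
--         m = min(len(a), len(b))
--         return sum(1 for i in range(m) if a[i] == b[i])
--
--     best_c, best_s = None, -1
--     for c, d in chains_dict.items():
--         s = rough_score(d["seq"], target_seq)
--         if s > best_s:
--             best_s = s
--             best_c = c
--     return best_c
-- ===== SOURCE B (Python) =====
-- def choose_chain_by_sequence_match(chains_dict, target_seq: str):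
--     # single pass: return at first exact match; otherwise remember first
--     # containment chain and the running best positional-overlap chain.
--     contain = None
--     best_c, best_s = None, -1
--     for c, d in chains_dict.items():
--         seq = d["seq"]
--         if seq == target_seq:
--             return c
--         if contain is None and (target_seq in seq or seq in target_seq):
--             contain = c
--         s = sum(x == y for x, y in zip(seq, target_seq))
--         if s > best_s:
--             best_c, best_s = c, s
--     return contain if contain is not None else best_c
-- ===== Notes on version B (the rewrite author's own statement) =====
-- stated objective: alternative
-- what changed: Replaces A's three separate scans of the dict (exact, containment, best-overlap with an index-loop score) by one loop that reads each seq once, returns at the first exact match, remembers the first containment chain and tracks the running best zip-based overlap score; same O(n*m) cost, one pass instead of three.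
-- outside the precondition, e.g. on choose_chain_by_sequence_match({'H': {'seq': 'A'}, 'L': {}}, 'A'): A returns 'H', B returns 'H'
import Mathlib
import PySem

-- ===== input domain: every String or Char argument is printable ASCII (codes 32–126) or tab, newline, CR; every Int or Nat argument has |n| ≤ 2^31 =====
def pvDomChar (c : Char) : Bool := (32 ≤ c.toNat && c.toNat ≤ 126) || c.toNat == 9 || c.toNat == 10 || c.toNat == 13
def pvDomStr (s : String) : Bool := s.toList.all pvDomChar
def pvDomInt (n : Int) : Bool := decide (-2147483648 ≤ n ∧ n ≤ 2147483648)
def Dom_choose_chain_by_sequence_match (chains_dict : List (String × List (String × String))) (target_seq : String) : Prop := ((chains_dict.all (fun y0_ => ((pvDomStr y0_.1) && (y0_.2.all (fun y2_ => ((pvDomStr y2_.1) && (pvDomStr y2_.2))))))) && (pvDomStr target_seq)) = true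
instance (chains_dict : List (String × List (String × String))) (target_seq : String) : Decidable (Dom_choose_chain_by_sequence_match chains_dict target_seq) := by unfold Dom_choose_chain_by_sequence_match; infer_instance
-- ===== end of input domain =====

-- B folds A's three scans of the dict into one pass that reads each seq once (alternative decomposition, same cost).
-- Pre_ excludes inputs where some chain's dict lacks the key "seq": on those the Python A raises KeyError unless an
-- earlier chain is an exact match (then both return that chain); B raises on exactly the same inputs.


-- ===== PORT A =====
-- d["seq"]: inside Pre_ the key is present, so getD "" is exact there (outside Pre_ Python raises).
def pvSeqOf (d : List (String × String)) : String := (PySem.Dict.mk d).getD "seq" ""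

-- rough_score(a, b): sum(1 for i in range(min(len(a), len(b))) if a[i] == b[i])
def pvRoughScore (a b : String) : Int :=
  (PySem.List.pyRange 0 (min (PySem.Str.len a) (PySem.Str.len b)) 1).foldl
    (fun acc i => if PySem.Str.pyGet? a i = PySem.Str.pyGet? b i then acc + 1 else acc) 0

-- first loop: exact match
def pvAExact (t : String) : List (String × List (String × String)) → Option String
  | [] => none
  | (c, d) :: rest => if pvSeqOf d = t then some c else pvAExact t rest

-- second loop: containment
def pvAContain (t : String) : List (String × List (String × String)) → Option String
  | [] => none
  | (c, d) :: rest =>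
      if PySem.Str.isIn t (pvSeqOf d) || PySem.Str.isIn (pvSeqOf d) t then some c
      else pvAContain t rest

-- third loop: best rough_score, strict improvement (first chain wins ties)
def pvABest (t : String) : List (String × List (String × String)) → Option String → Int → Option String
  | [], bc, _ => bc
  | (c, d) :: rest, bc, bs =>
      let s := pvRoughScore (pvSeqOf d) t
      if s > bs then pvABest t rest (some c) s else pvABest t rest bc bs

def choose_chain_by_sequence_match (chains_dict : List (String × List (String × String))) (target_seq : String) : Option String :=
  match pvAExact target_seq chains_dict with
  | some c => some c
  | none =>
    match pvAContain target_seq chains_dict with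
    | some c => some c
    | none => pvABest target_seq chains_dict none (-1)

-- ===== PORT B =====
-- s = sum(x == y for x, y in zip(seq, target_seq))
def pvZipScore (a b : String) : Int :=
  ((a.toList.zip b.toList).countP (fun p => p.1 == p.2) : Int)

-- the single loop of Source B: state = (contain, best_c, best_s); early return on exact match
def pvBGo (t : String) : List (String × List (String × String)) → Option String → Option String → Int → Option String
  | [], cont, bc, _ => match cont with | some c => some c | none => bc
  | (c, d) :: rest, cont, bc, bs =>
      let seq := pvSeqOf d
      if seq = t then some c
      else
        let cont' := if cont = none ∧ (PySem.Str.isIn t seq || PySem.Str.isIn seq t) then some c else cont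
        let s := pvZipScore seq t
        if s > bs then pvBGo t rest cont' (some c) s else pvBGo t rest cont' bc bs

def choose_chain_by_sequence_match_alt (chains_dict : List (String × List (String × String))) (target_seq : String) : Option String :=
  pvBGo target_seq chains_dict none none (-1)

-- ===== PRECONDITION & SPEC =====
-- Pre_ excludes exactly the inputs where some chain's dict is missing the key "seq",
-- on which the Python A raises KeyError (the Python B raises there too).
def Pre_choose_chain_by_sequence_match (chains_dict : List (String × List (String × String))) (_target_seq : String) : Prop :=
  chains_dict.all (fun p => (PySem.Dict.mk p.2).contains "seq") = true
instance (chains_dict : List (String × List (String × String))) (target_seq : String) : Decidable (Pre_choose_chain_by_sequence_match chains_dict target_seq) := by unfold Pre_choose_chain_by_sequence_match; infer_instance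

def pvWitness_choose_chain_by_sequence_match : (List (String × List (String × String))) × String :=
  ([("H", [("seq", "AB")]), ("L", [("seq", "CD")])], "CB")

def Spec_choose_chain_by_sequence_match (chains_dict : List (String × List (String × String))) (target_seq : String) (out : Option String) : Prop := out = choose_chain_by_sequence_match_alt chains_dict target_seq
instance (chains_dict : List (String × List (String × String))) (target_seq : String) (out : Option String) : Decidable (Spec_choose_chain_by_sequence_match chains_dict target_seq out) := by unfold Spec_choose_chain_by_sequence_match; infer_instance

-- ===== CLAIM (what is proved, stated in full; the proofs are below) =====
def Claim_equal_choose_chain_by_sequence_match : Prop := ∀ (chains_dict : List (String × List (String × String))) (target_seq : String), Dom_choose_chain_by_sequence_match chains_dict target_seq → Pre_choose_chain_by_sequence_match chains_dict target_seq → Spec_choose_chain_by_sequence_match chains_dict target_seq (choose_chain_by_sequence_match chains_dict target_seq)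

-- ===== LEMMAS AND PROOFS =====

-- the index loop over range(min(len,len)) counts exactly the equal pairs of the zip
lemma countP_range_eq_zip (la lb : List Char) :
    (List.range (min la.length lb.length)).countP (fun k => la[k]? == lb[k]?)
      = (la.zip lb).countP (fun p => p.1 == p.2) := by
  induction la generalizing lb with
  | nil => simp
  | cons x la ih =>
    cases lb with
    | nil => simp
    | cons y lb =>
      have h1 : min (x :: la).length (y :: lb).length = (min la.length lb.length) + 1 := by
        simp [Nat.succ_min_succ]
      rw [h1, List.range_succ_eq_map, List.countP_cons, List.countP_map]
      have h2 : (List.range (min la.length lb.length)).countP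
          ((fun k => (x :: la)[k]? == (y :: lb)[k]?) ∘ (· + 1))
          = (List.range (min la.length lb.length)).countP (fun k => la[k]? == lb[k]?) := by
        apply List.countP_congr; intro k _; simp
      rw [h2, ih lb]
      simp [List.countP_cons, Nat.add_comm]

-- A's rough_score and B's zip score agree
lemma score_eq (a b : String) : pvRoughScore a b = pvZipScore a b := by
  unfold pvRoughScore pvZipScore
  have hm : min (PySem.Str.len a) (PySem.Str.len b)
      = ((min a.toList.length b.toList.length : Nat) : Int) := by
    simp [PySem.Str.len_eq, Nat.cast_min]
  rw [hm, PySem.List.pyRange_one, PySem.List.foldl_ite_add_one]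
  have ht : (((min a.toList.length b.toList.length : Nat) : Int) - 0).toNat
      = min a.toList.length b.toList.length := by omega
  rw [ht, List.countP_map, ← countP_range_eq_zip]
  have h3 : List.countP ((fun x => decide (PySem.Str.pyGet? a x = PySem.Str.pyGet? b x)) ∘ fun k : Nat => 0 + (k : Int))
        (List.range (min a.toList.length b.toList.length))
      = List.countP (fun k => a.toList[k]? == b.toList[k]?)
        (List.range (min a.toList.length b.toList.length)) := by
    apply List.countP_congr; intro k _; simp
  rw [h3]; ring

-- invariant of B's single loop: it computes A's three loops composed with the running state
lemma go_spec (t : String) (l : List (String × List (String × String)))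
    (cont bc : Option String) (bs : Int) :
    pvBGo t l cont bc bs =
      match pvAExact t l with
      | some c => some c
      | none =>
        match cont with
        | some c0 => some c0
        | none =>
          match pvAContain t l with
          | some c => some c
          | none => pvABest t l bc bs := by
  induction l generalizing cont bc bs with
  | nil => cases cont <;> simp [pvBGo, pvAExact, pvAContain, pvABest]
  | cons hd rest ih =>
    obtain ⟨c, d⟩ := hd
    simp only [pvBGo, pvAExact, pvAContain, pvABest, ← score_eq]
    by_cases hex : pvSeqOf d = t
    · simp [hex]
    · simp only [hex, if_false]
      cases cont with
      | some c0 =>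
        simp only [reduceCtorEq, false_and, if_false]
        by_cases hs : pvRoughScore (pvSeqOf d) t > bs <;>
          simp [hs, ih]
      | none =>
        by_cases hc : (PySem.Str.isIn t (pvSeqOf d) || PySem.Str.isIn (pvSeqOf d) t) = true
        · simp only [hc, and_true]
          by_cases hs : pvRoughScore (pvSeqOf d) t > bs <;>
            simp [hs, ih]
        · simp only [hc]
          by_cases hs : pvRoughScore (pvSeqOf d) t > bs <;> simp [hs, ih]

-- ===== VERDICT (by name: the statement is the Claim_ definition above) =====
theorem choose_chain_by_sequence_match_spec : Claim_equal_choose_chain_by_sequence_match := by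
  intro chains_dict target_seq _ _
  unfold Spec_choose_chain_by_sequence_match choose_chain_by_sequence_match choose_chain_by_sequence_match_alt
  rw [go_spec]
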